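-- pv_equiv track=rewrite | github.com/graceclaudia19/compiler-cfg-python | parsing.py | strCheckOneTick
-- ===== SOURCE A (Python) =====
-- def strCheckOneTick(list):
--     ticks = False
--     l = []
--     for el in list:
--         li = []
--         for i in el:
--             if i == "'":
--                 ticks = not ticks
--                 li.append(i)
--                 if ticks:
--                     li.append("word")
--             elif ticks:
--                 pass
--             else:
--                 li.append(i)
--         l.append(li)
--     if (ticks):
--         l = []
--     return l
-- ===== SOURCE B (Python) =====
-- def _segments(el):
--     # split a token list on "'" tokens into the segments between quotes
--     if not el:
--         return [[]]
--     t, rest = el[0], el[1:]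
--     segs = _segments(rest)
--     if t == "'":
--         return [[]] + segs
--     return [[t] + segs[0]] + segs[1:]
--
--
-- def _emit(ticks, segs):
--     # render segments: outside-quote segments are kept, inside ones dropped;
--     # each boundary emits "'" and, on an opening quote, "word"
--     out = [] if ticks else segs[0][:]
--     if len(segs) == 1:
--         return ticks, out
--     ticks = not ticks
--     out.append("'")
--     if ticks:
--         out.append("word")
--     ticks, tail = _emit(ticks, segs[1:])
--     return ticks, out + tail
--
--
-- def strCheckOneTick(list):
--     total = sum(el.count("'") for el in list)
--     ticks = False
--     out = []
--     for el in list: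
--         ticks, li = _emit(ticks, _segments(el))
--         out.append(li)
--     return [] if total % 2 == 1 else out
-- ===== Notes on version B (the rewrite author's own statement) =====
-- stated objective: alternative
-- what changed: B replaces A's single token-by-token boolean-toggle pass with a split-on-quote decomposition: each element is split into segments between "'" tokens, outside segments are emitted and inside ones dropped, and the final wipe uses a closed-form parity test on the total quote count instead of the leftover toggle.
import Mathlib
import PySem

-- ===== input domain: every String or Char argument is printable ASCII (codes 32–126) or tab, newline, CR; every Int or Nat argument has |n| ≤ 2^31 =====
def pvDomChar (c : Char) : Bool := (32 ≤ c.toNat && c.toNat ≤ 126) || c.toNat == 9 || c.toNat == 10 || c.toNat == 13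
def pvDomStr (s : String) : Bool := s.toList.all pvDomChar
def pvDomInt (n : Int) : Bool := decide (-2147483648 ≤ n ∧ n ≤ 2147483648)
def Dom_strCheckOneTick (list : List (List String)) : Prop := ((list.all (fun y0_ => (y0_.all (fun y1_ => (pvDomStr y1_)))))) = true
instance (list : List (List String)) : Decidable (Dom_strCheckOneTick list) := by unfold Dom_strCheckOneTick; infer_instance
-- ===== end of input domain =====

-- B re-decomposes A's single token-by-token toggle pass into split-on-quote segments
-- plus a closed-form parity test for the final wipe (objective: alternative decomposition).

-- ===== PORT A =====
-- inner loop body of A: one token i against state (ticks, li)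
def pvStepA (st : Bool × List String) (i : String) : Bool × List String :=
  if i = "'" then
    let t := !st.1
    (t, st.2 ++ [i] ++ (if t then ["word"] else []))
  else if st.1 then st
  else (st.1, st.2 ++ [i])

def strCheckOneTick (list : List (List String)) : List (List String) :=
  let st := list.foldl (fun (st : Bool × List (List String)) el =>
      let inner := el.foldl pvStepA (st.1, [])
      (inner.1, st.2 ++ [inner.2])) (false, [])
  if st.1 then [] else st.2

-- ===== PORT B =====
-- split a token list on "'" tokens into the segments between quotes (never returns [])
def pvSegments : List String → List (List String)
  | [] => [[]]
  | t :: rest =>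
    let segs := pvSegments rest
    if t = "'" then [[]] ++ segs
    else [[t] ++ segs.headD []] ++ segs.tail   -- segs is always nonempty: headD/tail = Python segs[0]/segs[1:]

-- render segments: outside-quote segments kept, inside ones dropped;
-- each boundary emits "'" and, on an opening quote, "word"
def pvEmit (ticks : Bool) : List (List String) → Bool × List String
  | [] => (ticks, [])        -- unreachable: pvSegments never returns []
  | s :: rest =>
    let out := if ticks then [] else s
    if rest = [] then (ticks, out)
    else
      let t := !ticks
      let out := out ++ ["'"] ++ (if t then ["word"] else [])
      let r := pvEmit t rest
      (r.1, out ++ r.2)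

def strCheckOneTick_alt (list : List (List String)) : List (List String) :=
  let total := (list.map (fun el => PySem.List.count el "'")).sum
  let st := list.foldl (fun (st : Bool × List (List String)) el =>
      let r := pvEmit st.1 (pvSegments el)
      (r.1, st.2 ++ [r.2])) (false, [])
  if total % 2 = 1 then [] else st.2

-- ===== PRECONDITION & SPEC =====
def Spec_strCheckOneTick (list : List (List String)) (out : List (List String)) : Prop := out = strCheckOneTick_alt list
instance (list : List (List String)) (out : List (List String)) : Decidable (Spec_strCheckOneTick list out) := by unfold Spec_strCheckOneTick; infer_instance

-- ===== CLAIM (what is proved, stated in full; the proofs are below) =====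
def Claim_equal_strCheckOneTick : Prop := ∀ (list : List (List String)), Dom_strCheckOneTick list → Spec_strCheckOneTick list (strCheckOneTick list)

-- ===== LEMMAS AND PROOFS =====

theorem pvSegments_ne_nil (el : List String) : pvSegments el ≠ [] := by
  cases el with
  | nil => simp [pvSegments]
  | cons t rest => simp only [pvSegments]; split <;> simp

-- inside quotes, a non-quote token prefixed to the head segment is dropped
theorem pvEmit_true_cons (t : String) (s : List String) (ss : List (List String)) :
    pvEmit true ((t :: s) :: ss) = pvEmit true (s :: ss) := by
  cases ss <;> simp [pvEmit]

-- outside quotes, a non-quote token prefixed to the head segment is emitted first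
theorem pvEmit_false_cons (t : String) (s : List String) (ss : List (List String)) :
    pvEmit false ((t :: s) :: ss) =
      ((pvEmit false (s :: ss)).1, t :: (pvEmit false (s :: ss)).2) := by
  cases ss <;> simp [pvEmit]

-- a leading empty segment (an initial quote) emits the separator and toggles
theorem pvEmit_nil_cons (ticks : Bool) (s : List String) (ss : List (List String)) :
    pvEmit ticks ([] :: s :: ss) =
      ((pvEmit (!ticks) (s :: ss)).1,
        ["'"] ++ (if !ticks then ["word"] else []) ++ (pvEmit (!ticks) (s :: ss)).2) := by
  cases ss <;> cases ticks <;> simp [pvEmit]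

-- A's inner fold equals B's split-then-emit, with the accumulator factored out
theorem inner_eq (el : List String) : ∀ (ticks : Bool) (acc : List String),
    el.foldl pvStepA (ticks, acc) =
      ((pvEmit ticks (pvSegments el)).1, acc ++ (pvEmit ticks (pvSegments el)).2) := by
  induction el with
  | nil => intro ticks acc; simp [pvSegments, pvEmit]
  | cons t rest ih =>
    intro ticks acc
    rcases h : pvSegments rest with _ | ⟨s, ss⟩
    · exact absurd h (pvSegments_ne_nil rest)
    · by_cases ht : t = "'"
      · subst ht
        have hstep : pvStepA (ticks, acc) "'"
            = (!ticks, acc ++ ["'"] ++ (if !ticks then ["word"] else [])) := by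
          simp [pvStepA]
        have hseg : pvSegments ("'" :: rest) = [] :: s :: ss := by
          simp [pvSegments, h]
        rw [List.foldl_cons, hstep, ih, h, hseg, pvEmit_nil_cons]
        simp [List.append_assoc]
      · have hseg : pvSegments (t :: rest) = (t :: s) :: ss := by
          simp [pvSegments, h, ht]
        cases hticks : ticks with
        | true =>
          have hstep : pvStepA (true, acc) t = (true, acc) := by simp [pvStepA, ht]
          rw [List.foldl_cons, hstep, ih, h, hseg, pvEmit_true_cons]
        | false =>
          have hstep : pvStepA (false, acc) t = (false, acc ++ [t]) := by
            simp [pvStepA, ht]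
          rw [List.foldl_cons, hstep, ih, h, hseg, pvEmit_false_cons]
          simp

-- parity of a count grows by one per quote token
theorem decide_succ_mod (c : Nat) :
    decide ((c + 1) % 2 = 1) = !decide (c % 2 = 1) := by
  rcases Nat.mod_two_eq_zero_or_one c with h | h <;> simp [Nat.add_mod, h]

-- parity of a sum is the xor of the parities
theorem decide_add_mod (a b : Nat) :
    decide ((a + b) % 2 = 1) = xor (decide (a % 2 = 1)) (decide (b % 2 = 1)) := by
  rcases Nat.mod_two_eq_zero_or_one a with h | h <;>
    rcases Nat.mod_two_eq_zero_or_one b with h' | h' <;>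
      simp [Nat.add_mod, h, h']

-- the inner fold's final toggle is the initial one xor-ed with the quote-count parity
theorem inner_fst (el : List String) : ∀ (ticks : Bool) (acc : List String),
    (el.foldl pvStepA (ticks, acc)).1 =
      xor ticks (decide (PySem.List.count el "'" % 2 = 1)) := by
  induction el with
  | nil => intro ticks acc; simp [PySem.List.count]
  | cons t rest ih =>
    intro ticks acc
    by_cases ht : t = "'"
    · subst ht
      have hstep : pvStepA (ticks, acc) "'"
          = (!ticks, acc ++ ["'"] ++ (if !ticks then ["word"] else [])) := by
        simp [pvStepA]
      have hc : PySem.List.count ("'" :: rest) "'" = PySem.List.count rest "'" + 1 := by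
        simp [PySem.List.count]
      rw [List.foldl_cons, hstep, ih, hc, decide_succ_mod]
      cases ticks <;> cases hb : decide (PySem.List.count rest "'" % 2 = 1) <;> simp
    · have hc : PySem.List.count (t :: rest) "'" = PySem.List.count rest "'" := by
        simp [PySem.List.count, ht]
      cases hticks : ticks with
      | true =>
        have hstep : pvStepA (true, acc) t = (true, acc) := by simp [pvStepA, ht]
        rw [List.foldl_cons, hstep, ih, hc]
      | false =>
        have hstep : pvStepA (false, acc) t = (false, acc ++ [t]) := by
          simp [pvStepA, ht]
        rw [List.foldl_cons, hstep, ih, hc]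

-- both outer folds coincide …
theorem outer_eq (list : List (List String)) : ∀ (ticks : Bool) (acc : List (List String)),
    list.foldl (fun (st : Bool × List (List String)) el =>
        let inner := el.foldl pvStepA (st.1, [])
        (inner.1, st.2 ++ [inner.2])) (ticks, acc) =
      list.foldl (fun (st : Bool × List (List String)) el =>
        let r := pvEmit st.1 (pvSegments el)
        (r.1, st.2 ++ [r.2])) (ticks, acc) := by
  induction list with
  | nil => intro ticks acc; rfl
  | cons el rest ih =>
    intro ticks acc
    simp only [List.foldl_cons]
    rw [inner_eq]
    simp only [List.nil_append]
    exact ih _ _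

-- … and the final toggle is the total quote-count parity
theorem outer_fst (list : List (List String)) : ∀ (ticks : Bool) (acc : List (List String)),
    (list.foldl (fun (st : Bool × List (List String)) el =>
        let inner := el.foldl pvStepA (st.1, [])
        (inner.1, st.2 ++ [inner.2])) (ticks, acc)).1 =
      xor ticks (decide ((list.map (fun el => PySem.List.count el "'")).sum % 2 = 1)) := by
  induction list with
  | nil => intro ticks acc; simp
  | cons el rest ih =>
    intro ticks acc
    simp only [List.foldl_cons]
    rw [ih, inner_fst, Bool.xor_assoc, List.map_cons, List.sum_cons, decide_add_mod]

-- ===== VERDICT (by name: the statement is the Claim_ definition above) =====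
theorem strCheckOneTick_spec : Claim_equal_strCheckOneTick := by
  intro list _
  unfold Spec_strCheckOneTick strCheckOneTick strCheckOneTick_alt
  have hfst : (list.foldl (fun (st : Bool × List (List String)) el =>
        let inner := el.foldl pvStepA (st.1, [])
        (inner.1, st.2 ++ [inner.2])) (false, [])).1
      = decide ((list.map (fun el => PySem.List.count el "'")).sum % 2 = 1) := by
    rw [outer_fst]; simp
  rw [outer_eq] at hfst ⊢
  cases hb : decide ((list.map (fun el => PySem.List.count el "'")).sum % 2 = 1) with
  | true =>
    rw [hb] at hfst
    simp only [hfst]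
    rw [if_pos trivial, if_pos (of_decide_eq_true hb)]
  | false =>
    rw [hb] at hfst
    simp only [hfst]
    rw [if_neg Bool.false_ne_true, if_neg (of_decide_eq_false hb)]
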